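-- pv_equiv track=rewrite | github.com/manu-sapiens/text2pptx | pptx_helper.py | find_split_point
-- ===== SOURCE A (Python) =====
-- def find_split_point(flat_items_list, max_chars_per_slide):
--     """Find the best split point around the character threshold, preferably at level=1."""
--     current_char_count = 0
--     for i, (text, level) in enumerate(flat_items_list):
--         current_char_count += len(text)
--         if current_char_count > max_chars_per_slide:
--             # Look for a level=1 item around the threshold
--             for j in range(max(0, i-3), min(len(flat_items_list), i+3)):
--                 if flat_items_list[j][1] == 1:
--                     return j
--             return i
--     return len(flat_items_list)
-- ===== SOURCE B (Python) =====
-- def find_split_point(flat_items_list, max_chars_per_slide):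
--     """Find the best split point around the character threshold, preferably at level=1."""
--     # Prefix-sum table of character counts, then binary search for the first
--     # index whose cumulative count exceeds the threshold.
--     prefix = [0]
--     for text, _level in flat_items_list:
--         prefix.append(prefix[-1] + len(text))
--     n = len(flat_items_list)
--     if prefix[n] <= max_chars_per_slide:
--         return n
--     lo, hi = 0, n
--     while lo < hi:
--         mid = (lo + hi) // 2
--         if prefix[mid + 1] > max_chars_per_slide:
--             hi = mid
--         else:
--             lo = mid + 1
--     i = lo
--     for j in range(max(0, i - 3), min(n, i + 3)):
--         if flat_items_list[j][1] == 1: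
--             return j
--     return i
-- ===== Notes on version B (the rewrite author's own statement) =====
-- stated objective: alternative
-- what changed: A's single interleaved accumulate-and-test loop is replaced by building a prefix-sum table of character counts and then binary-searching it for the first index whose cumulative count exceeds the threshold; the small level=1 window scan stays.
import Mathlib
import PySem

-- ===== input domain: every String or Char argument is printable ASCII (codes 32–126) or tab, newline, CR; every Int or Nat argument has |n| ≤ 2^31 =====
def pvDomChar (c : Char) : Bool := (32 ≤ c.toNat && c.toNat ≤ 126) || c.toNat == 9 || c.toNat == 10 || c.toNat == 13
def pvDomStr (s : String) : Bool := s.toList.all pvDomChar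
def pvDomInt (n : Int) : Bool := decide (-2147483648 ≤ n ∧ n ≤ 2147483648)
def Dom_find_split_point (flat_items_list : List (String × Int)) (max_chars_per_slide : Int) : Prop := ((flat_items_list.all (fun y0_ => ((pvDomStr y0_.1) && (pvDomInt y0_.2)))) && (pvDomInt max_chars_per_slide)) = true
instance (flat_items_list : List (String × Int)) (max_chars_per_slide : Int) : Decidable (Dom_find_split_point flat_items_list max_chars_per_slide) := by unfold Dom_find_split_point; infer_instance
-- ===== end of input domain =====

-- B replaces A's single interleaved accumulate-and-search loop by a prefix-sum
-- table followed by a binary search for the first index past the threshold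
-- (objective: alternative decomposition; the window scan for level=1 stays).


-- ===== PORT A =====
-- inner window loop: for j in range(max(0,i-3), min(len, i+3)): if flat[j][1]==1: return j; (fall through) return i
def fspWindowA (flat : List (String × Int)) (i : Int) : Int :=
  match (PySem.List.pyRange (max 0 (i - 3)) (min (flat.length : Int) (i + 3)) 1).find?
      (fun j => ((PySem.List.pyGet? flat j).map Prod.snd) == some 1) with
  | some j => j
  | none => i

-- the enumerate loop of A, carrying the running index i and current_char_count
def fspLoopA (flat : List (String × Int)) (maxc : Int) :
    List (String × Int) → Int → Int → Int
  | [], _, _ => (flat.length : Int)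
  | (t, _) :: rs, i, cnt =>
    let cnt' := cnt + PySem.Str.len t
    if cnt' > maxc then fspWindowA flat i
    else fspLoopA flat maxc rs (i + 1) cnt'

def find_split_point (flat_items_list : List (String × Int)) (max_chars_per_slide : Int) : Int :=
  fspLoopA flat_items_list max_chars_per_slide flat_items_list 0 0

-- ===== PORT B =====
-- cumulative character counts: fspCum a xs = tail of B's `prefix` table (prefix = 0 :: fspCum 0 xs)
def fspCum (a : Int) : List (String × Int) → List Int
  | [] => []
  | (t, _) :: rs => (a + PySem.Str.len t) :: fspCum (a + PySem.Str.len t) rs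

-- binary search: smallest i in [lo,hi) with prefix[i+1] > maxc (prefix = 0 :: cum)
-- fuel = n bounds the number of halving steps (hi - lo ≤ fuel throughout); pure totality device
def fspBS (cum : List Int) (maxc : Int) : Nat → Nat → Nat → Nat
  | 0, lo, _ => lo
  | fuel + 1, lo, hi =>
    if lo < hi then
      let mid := (lo + hi) / 2
      if cum.getD mid 0 > maxc then fspBS cum maxc fuel lo mid
      else fspBS cum maxc fuel (mid + 1) hi
    else lo

def fspWindowB (flat : List (String × Int)) (i : Int) : Int :=
  match (PySem.List.pyRange (max 0 (i - 3)) (min (flat.length : Int) (i + 3)) 1).find?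
      (fun j => ((PySem.List.pyGet? flat j).map Prod.snd) == some 1) with
  | some j => j
  | none => i

def find_split_point_alt (flat_items_list : List (String × Int)) (max_chars_per_slide : Int) : Int :=
  let cum := fspCum 0 flat_items_list
  let n := flat_items_list.length
  if (0 :: cum).getD n 0 ≤ max_chars_per_slide then (n : Int)
  else fspWindowB flat_items_list ((fspBS cum max_chars_per_slide n 0 n : Nat) : Int)

-- ===== PRECONDITION & SPEC =====
def Spec_find_split_point (flat_items_list : List (String × Int)) (max_chars_per_slide : Int) (out : Int) : Prop := out = find_split_point_alt flat_items_list max_chars_per_slide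
instance (flat_items_list : List (String × Int)) (max_chars_per_slide : Int) (out : Int) : Decidable (Spec_find_split_point flat_items_list max_chars_per_slide out) := by unfold Spec_find_split_point; infer_instance

-- ===== CLAIM (what is proved, stated in full; the proofs are below) =====
def Claim_equal_find_split_point : Prop := ∀ (flat_items_list : List (String × Int)) (max_chars_per_slide : Int), Dom_find_split_point flat_items_list max_chars_per_slide → Spec_find_split_point flat_items_list max_chars_per_slide (find_split_point flat_items_list max_chars_per_slide)

-- ===== LEMMAS AND PROOFS =====

theorem fspCum_length (a : Int) (xs : List (String × Int)) :
    (fspCum a xs).length = xs.length := by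
  induction xs generalizing a with
  | nil => rfl
  | cons x rs ih => cases x; simp [fspCum, ih]

theorem fspCum_lower (xs : List (String × Int)) :
    ∀ (a : Int) (k : Nat), k < xs.length → a ≤ (fspCum a xs).getD k 0 := by
  induction xs with
  | nil => intro a k h; simp at h
  | cons x rs ih =>
    rcases x with ⟨t, l⟩
    intro a k h
    have hlen : (0:Int) ≤ PySem.Str.len t := by simp [PySem.Str.len_eq]
    cases k with
    | zero => simp only [fspCum, List.getD_cons_zero]; linarith
    | succ k =>
      have h2 := ih (a + PySem.Str.len t) k (by simpa using h)
      simp only [fspCum, List.getD_cons_succ]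
      linarith

theorem fspCum_mono (xs : List (String × Int)) :
    ∀ (a : Int) (j k : Nat), j ≤ k → k < xs.length →
    (fspCum a xs).getD j 0 ≤ (fspCum a xs).getD k 0 := by
  induction xs with
  | nil => intro a j k _ h; simp at h
  | cons x rs ih =>
    rcases x with ⟨t, l⟩
    intro a j k hjk hk
    cases j with
    | zero =>
      cases k with
      | zero => simp
      | succ k =>
        have h2 := fspCum_lower rs (a + PySem.Str.len t) k (by simpa using hk)
        simpa [fspCum] using h2
    | succ j =>
      cases k with
      | zero => omega
      | succ k =>
        have h2 := ih (a + PySem.Str.len t) j k (by omega) (by simpa using hk)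
        simpa [fspCum] using h2

-- A's outer loop expressed through findIdx? on the cumulative table
theorem fspLoopA_eq (flat : List (String × Int)) (maxc : Int) :
    ∀ (rest : List (String × Int)) (i cnt : Int),
    fspLoopA flat maxc rest i cnt =
      match (fspCum cnt rest).findIdx? (fun c => maxc < c) with
      | some k => fspWindowA flat (i + (k : Int))
      | none => (flat.length : Int) := by
  intro rest
  induction rest with
  | nil => intro i cnt; simp [fspLoopA, fspCum]
  | cons x rs ih =>
    rcases x with ⟨t, l⟩
    intro i cnt
    simp only [fspLoopA, fspCum, List.findIdx?_cons]
    by_cases h : maxc < cnt + PySem.Str.len t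
    · rw [if_pos h, if_pos (decide_eq_true h)]
      norm_num
    · rw [if_neg (by omega), ih (i + 1) (cnt + PySem.Str.len t)]
      simp only [decide_eq_true_eq]
      rw [if_neg h]
      cases hf : (fspCum (cnt + PySem.Str.len t) rs).findIdx? (fun c => maxc < c) with
      | none => simp
      | some k =>
        simp only [Option.map_some]
        have : i + ((k + 1 : Nat) : Int) = (i + 1) + (k : Int) := by push_cast; ring
        rw [this]

theorem fspBS_eq (cum : List Int) (maxc : Int)
    (hmono : ∀ j k : Nat, j ≤ k → k < cum.length →
      cum.getD j 0 ≤ cum.getD k 0) :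
    ∀ (d lo hi ℓ : Nat), hi - lo ≤ d → hi ≤ cum.length → lo ≤ ℓ → ℓ ≤ hi →
    (∀ m : Nat, m < ℓ → ¬ maxc < cum.getD m 0) → maxc < cum.getD ℓ 0 → ℓ < cum.length →
    fspBS cum maxc d lo hi = ℓ := by
  intro d
  induction d with
  | zero =>
    intro lo hi ℓ hd _ h1 h2 _ _ _
    simp only [fspBS]
    omega
  | succ d ih =>
    intro lo hi ℓ hd hhi h1 h2 hprev hP hℓ
    by_cases hlh : lo < hi
    · rw [fspBS, if_pos hlh]
      have hmid1 : lo ≤ (lo + hi) / 2 := by omega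
      have hmid2 : (lo + hi) / 2 < hi := by omega
      by_cases hm : cum.getD ((lo + hi) / 2) 0 > maxc
      · rw [if_pos hm]
        have hle : ℓ ≤ (lo + hi) / 2 := by
          by_contra hc
          exact hprev _ (by omega) hm
        exact ih lo ((lo + hi) / 2) ℓ (by omega) (by omega) h1 hle hprev hP hℓ
      · rw [if_neg hm]
        have hlt : (lo + hi) / 2 < ℓ := by
          by_contra hc
          exact hm (lt_of_lt_of_le hP (hmono ℓ ((lo + hi) / 2) (by omega) (by omega)))
        exact ih ((lo + hi) / 2 + 1) hi ℓ (by omega) hhi (by omega) h2 hprev hP hℓ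
    · rw [fspBS, if_neg hlh]
      omega

-- ===== VERDICT (by name: the statement is the Claim_ definition above) =====

theorem find_split_point_spec : Claim_equal_find_split_point := by
  unfold Claim_equal_find_split_point Spec_find_split_point
  intro flat maxc _
  show fspLoopA flat maxc flat 0 0 =
    (if (0 :: fspCum 0 flat).getD flat.length 0 ≤ maxc then (flat.length : Int)
     else fspWindowB flat ((fspBS (fspCum 0 flat) maxc flat.length 0 flat.length : Nat) : Int))
  rw [fspLoopA_eq]
  have hlen : (fspCum 0 flat).length = flat.length := fspCum_length 0 flat
  cases hf : (fspCum 0 flat).findIdx? (fun c => maxc < c) with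
  | none =>
    rw [List.findIdx?_eq_none_iff] at hf
    cases flat with
    | nil =>
      simp only [fspCum, List.length_nil]
      split_ifs with h
      · rfl
      · show (0:Int) = fspWindowB [] ((fspBS [] maxc 0 0 0 : Nat) : Int)
        simp only [fspBS]
        simp [fspWindowB, PySem.List.pyRange_one_eq_nil]
    | cons x xs =>
      have hn : (x :: xs).length = xs.length + 1 := by simp
      have hmem : (fspCum 0 (x :: xs)).getD xs.length 0 ∈ fspCum 0 (x :: xs) := by
        rw [List.getD_eq_getElem _ _ (by rw [fspCum_length]; omega)]
        exact List.getElem_mem _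
      have hle : (fspCum 0 (x :: xs)).getD xs.length 0 ≤ maxc := by
        have := hf _ hmem
        simp only [decide_eq_false_iff_not, not_lt] at this
        exact this
      rw [hn, List.getD_cons_succ, if_pos hle]
  | some k =>
    rw [List.findIdx?_eq_some_iff_getElem] at hf
    obtain ⟨hk, hp, hprev⟩ := hf
    simp only [decide_eq_true_eq] at hp
    have hk' : k < flat.length := by omega
    obtain ⟨m, hm⟩ : ∃ m, flat.length = m + 1 := ⟨flat.length - 1, by omega⟩
    have hgd : ∀ (j : Nat) (hj : j < (fspCum 0 flat).length),
        (fspCum 0 flat).getD j 0 = (fspCum 0 flat)[j]'(by omega) := by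
      intro j hj; exact List.getD_eq_getElem _ _ hj
    have hcond : ¬ (0 :: fspCum 0 flat).getD flat.length 0 ≤ maxc := by
      rw [hm, List.getD_cons_succ, not_le]
      calc maxc < (fspCum 0 flat)[k] := hp
        _ = (fspCum 0 flat).getD k 0 := (hgd k hk).symm
        _ ≤ (fspCum 0 flat).getD m 0 := fspCum_mono flat 0 k m (by omega) (by omega)
    rw [if_neg hcond]
    have hbs : fspBS (fspCum 0 flat) maxc flat.length 0 flat.length = k := by
      refine fspBS_eq (fspCum 0 flat) maxc ?_ flat.length 0 flat.length k ?_ ?_ ?_ ?_ ?_ ?_ ?_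
      · intro j1 k1 hjk1 hk1; exact fspCum_mono flat 0 j1 k1 hjk1 (by omega)
      · omega
      · omega
      · omega
      · omega
      · intro j hj
        rw [hgd j (by omega)]
        simpa using hprev j hj
      · rw [hgd k hk]; exact hp
      · exact hk
    rw [hbs]
    have hw : fspWindowB = fspWindowA := rfl
    rw [hw]
    norm_num
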